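-- pv_equiv track=rewrite | github.com/skp96/Tic-Tac-Toe | core_tic_tac_toe/board.py | __vertical_positions
-- ===== SOURCE A (Python) =====
-- def __vertical_positions(board, board_length, vertical_length):
--     vertical_positions = []
--
--     for vertical_pos in range(0, vertical_length):
--         column = []
--
--         index = vertical_pos
--
--         while index < board_length:
--             vertical = board[index]
--             column.append(vertical)
--
--             index += vertical_length
--
--         vertical_positions.append(column)
--
--     return vertical_positions
-- ===== SOURCE B (Python) =====
-- def __vertical_positions(board, board_length, vertical_length):
--     if vertical_length <= 0:
--         return []
--     columns = {}
--     for index in range(board_length):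
--         columns.setdefault(index % vertical_length, []).append(board[index])
--     return [columns.get(j, []) for j in range(vertical_length)]
-- ===== Notes on version B (the rewrite author's own statement) =====
-- stated objective: alternative
-- what changed: Replaces A's nested loops (one strided inner while-scan of the board per column) with a single pass over indices 0..board_length-1 that groups each board[index] into a dict keyed by index % vertical_length, then reads the columns back in key order.
import Mathlib
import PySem

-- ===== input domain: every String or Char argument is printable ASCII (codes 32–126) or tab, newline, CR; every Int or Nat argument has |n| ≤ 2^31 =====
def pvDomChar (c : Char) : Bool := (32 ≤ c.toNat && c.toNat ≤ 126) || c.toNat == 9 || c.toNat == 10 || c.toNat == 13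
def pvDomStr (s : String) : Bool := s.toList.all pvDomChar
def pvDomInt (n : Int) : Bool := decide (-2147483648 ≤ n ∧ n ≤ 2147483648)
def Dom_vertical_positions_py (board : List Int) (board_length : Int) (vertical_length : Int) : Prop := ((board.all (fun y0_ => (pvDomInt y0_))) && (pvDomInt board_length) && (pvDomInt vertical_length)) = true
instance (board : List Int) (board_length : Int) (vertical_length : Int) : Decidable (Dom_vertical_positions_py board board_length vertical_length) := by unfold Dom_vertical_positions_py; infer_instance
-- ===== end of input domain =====

-- B replaces A's nested column-by-column scans with a single pass that groups
-- board elements into a dict keyed by index % vertical_length (objective: alternative decomposition).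
-- ===== PORT A =====
-- inner 'while index < board_length' loop of A; the '0 < v' conjunct is only a
-- termination guard (A's loop runs with vertical_pos drawn from range(0, v), so 0 < v there)
def pvColumn (board : List Int) (n v idx : Int) : List Int :=
  if _h : idx < n ∧ 0 < v then
    PySem.List.pyGetD board idx 0 :: pvColumn board n v (idx + v)
  else []
termination_by (n - idx).toNat
decreasing_by omega

def vertical_positions_py (board : List Int) (board_length : Int) (vertical_length : Int) : List (List Int) :=
  (PySem.List.pyRange 0 vertical_length 1).foldl
    (fun acc vertical_pos => acc ++ [pvColumn board board_length vertical_length vertical_pos]) []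

-- ===== PORT B =====
def vertical_positions_py_alt (board : List Int) (board_length : Int) (vertical_length : Int) : List (List Int) :=
  if vertical_length ≤ 0 then []
  else
    let columns := (PySem.List.pyRange 0 board_length 1).foldl
      (fun d index => d.modify (PySem.Int.mod index vertical_length) []
        (· ++ [PySem.List.pyGetD board index 0])) PySem.Dict.empty
    (PySem.List.pyRange 0 vertical_length 1).map (fun j => columns.getD j [])

-- ===== PRECONDITION & SPEC =====
-- Pre_ excludes exactly the inputs where Python A raises IndexError:
-- vertical_length ≥ 1 together with board_length > len(board) makes A read past the board.
def Pre_vertical_positions_py (board : List Int) (board_length : Int) (vertical_length : Int) : Prop :=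
  vertical_length ≤ 0 ∨ board_length ≤ (board.length : Int)
instance (board : List Int) (board_length : Int) (vertical_length : Int) : Decidable (Pre_vertical_positions_py board board_length vertical_length) := by unfold Pre_vertical_positions_py; infer_instance
def pvWitness_vertical_positions_py : List Int × Int × Int := ([1, 2, 3, 4, 5, 6], 6, 3)

def Spec_vertical_positions_py (board : List Int) (board_length : Int) (vertical_length : Int) (out : List (List Int)) : Prop := out = vertical_positions_py_alt board board_length vertical_length
instance (board : List Int) (board_length : Int) (vertical_length : Int) (out : List (List Int)) : Decidable (Spec_vertical_positions_py board board_length vertical_length out) := by unfold Spec_vertical_positions_py; infer_instance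

-- ===== CLAIM (what is proved, stated in full; the proofs are below) =====
def Claim_equal_vertical_positions_py : Prop := ∀ (board : List Int) (board_length : Int) (vertical_length : Int), Dom_vertical_positions_py board board_length vertical_length → Pre_vertical_positions_py board board_length vertical_length → Spec_vertical_positions_py board board_length vertical_length (vertical_positions_py board board_length vertical_length)

-- ===== LEMMAS AND PROOFS =====

theorem foldl_append_singleton {α β : Type} (f : α → β) :
    ∀ (l : List α) (init : List β),
      l.foldl (fun acc x => acc ++ [f x]) init = init ++ l.map f := by
  intro l
  induction l with
  | nil => intro init; simp
  | cons a t ih => intro init; simp [List.foldl_cons, ih]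

-- in a run [a, b) of length ≤ v, only a itself is ≡ a (mod v)
theorem filter_mod_run (v a b : Int) (hv : 0 < v) (hab : a < b) (hb : b ≤ a + v) :
    (PySem.List.pyRange a b 1).filter (fun i => PySem.Int.mod i v == PySem.Int.mod a v) = [a] := by
  rw [PySem.List.pyRange_one_cons hab, List.filter_cons]
  simp only [beq_self_eq_true, if_true]
  have hnil : (PySem.List.pyRange (a + 1) b 1).filter
      (fun i => PySem.Int.mod i v == PySem.Int.mod a v) = [] := by
    rw [List.filter_eq_nil_iff]
    intro i hi
    rw [PySem.List.mem_pyRange_one] at hi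
    simp only [beq_iff_eq]
    intro hmod
    rw [PySem.Int.mod_eq_emod_of_pos hv, PySem.Int.mod_eq_emod_of_pos hv,
      Int.emod_eq_emod_iff_emod_sub_eq_zero] at hmod
    have : (i - a) % v = i - a := Int.emod_eq_of_lt (by omega) (by omega)
    omega
  rw [hnil]

theorem mod_add_self_right (a v : Int) (hv : 0 < v) :
    PySem.Int.mod (a + v) v = PySem.Int.mod a v := by
  rw [PySem.Int.mod_eq_emod_of_pos hv, PySem.Int.mod_eq_emod_of_pos hv]
  simp

theorem pvColumn_eq_filter_fuel (board : List Int) (n v : Int) (hv : 0 < v) :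
    ∀ (k : Nat) (idx : Int), 0 ≤ idx → (n - idx).toNat ≤ k →
      pvColumn board n v idx
        = ((PySem.List.pyRange idx n 1).filter
            (fun i => PySem.Int.mod i v == PySem.Int.mod idx v)).map
            (fun i => PySem.List.pyGetD board i 0) := by
  intro k
  induction k with
  | zero =>
    intro idx h0 hk
    rw [pvColumn]
    have hn : ¬ idx < n := by omega
    simp [hn, PySem.List.pyRange_one_eq_nil (by omega : n ≤ idx)]
  | succ k ih =>
    intro idx h0 hk
    rw [pvColumn]
    by_cases hlt : idx < n
    · simp only [hlt, hv, and_self, dite_true]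
      by_cases hstep : idx + v ≤ n
      · rw [PySem.List.pyRange_one_append idx (idx + v) n (by omega) hstep,
          List.filter_append, filter_mod_run v idx (idx + v) hv (by omega) (le_refl _)]
        have hpred : (PySem.List.pyRange (idx + v) n 1).filter
              (fun i => PySem.Int.mod i v == PySem.Int.mod idx v)
            = (PySem.List.pyRange (idx + v) n 1).filter
              (fun i => PySem.Int.mod i v == PySem.Int.mod (idx + v) v) := by
          rw [mod_add_self_right idx v hv]
        rw [hpred, List.map_append, ih (idx + v) (by omega) (by omega)]
        simp
      · rw [filter_mod_run v idx n hv hlt (by omega)]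
        rw [pvColumn]
        have : ¬ (idx + v < n ∧ 0 < v) := by omega
        simp [this]
    · simp [hlt, PySem.List.pyRange_one_eq_nil (by omega : n ≤ idx)]

-- the grouping dict, read back at key j (0 ≤ j < v), is exactly the filtered board
theorem dict_column (board : List Int) (n v j : Int) :
    (((PySem.List.pyRange 0 n 1).foldl
        (fun d index => d.modify (PySem.Int.mod index v) []
          (· ++ [PySem.List.pyGetD board index 0])) PySem.Dict.empty).getD j [])
      = ((PySem.List.pyRange 0 n 1).filter
          (fun i => PySem.Int.mod i v == j)).map (fun i => PySem.List.pyGetD board i 0) := by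
  have hfold : ((PySem.List.pyRange 0 n 1).map
        (fun i => (PySem.Int.mod i v, PySem.List.pyGetD board i 0))).foldl
        (fun d p => d.modify p.1 [] (· ++ [p.2])) PySem.Dict.empty
      = (PySem.List.pyRange 0 n 1).foldl
        (fun d index => d.modify (PySem.Int.mod index v) []
          (· ++ [PySem.List.pyGetD board index 0])) PySem.Dict.empty := by
    rw [List.foldl_map]
  rw [← hfold, PySem.Dict.getD_foldl_modify_append, PySem.Dict.getD_empty, List.nil_append,
    List.filter_map, List.map_map]
  rfl

theorem main_eq (board : List Int) (n v : Int) :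
    vertical_positions_py board n v = vertical_positions_py_alt board n v := by
  unfold vertical_positions_py vertical_positions_py_alt
  by_cases hv : v ≤ 0
  · simp [hv, PySem.List.pyRange_one_eq_nil (by omega : v ≤ 0)]
  · rw [not_le] at hv
    rw [if_neg (by omega)]
    rw [foldl_append_singleton]
    simp only [List.nil_append]
    apply List.map_congr_left
    intro j hj
    rw [PySem.List.mem_pyRange_one] at hj
    rw [dict_column board n v j]
    rw [pvColumn_eq_filter_fuel board n v hv (n - j).toNat j hj.1 (le_refl _)]
    have hjj : PySem.Int.mod j v = j := by
      rw [PySem.Int.mod_eq_emod_of_pos hv]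
      exact Int.emod_eq_of_lt hj.1 hj.2
    rw [hjj]
    by_cases hn : n ≤ j
    · rw [PySem.List.pyRange_one_eq_nil hn]
      have : (PySem.List.pyRange 0 n 1).filter (fun i => PySem.Int.mod i v == j) = [] := by
        rw [List.filter_eq_nil_iff]
        intro i hi
        rw [PySem.List.mem_pyRange_one] at hi
        simp only [beq_iff_eq]
        rw [PySem.Int.mod_eq_emod_of_pos hv, Int.emod_eq_of_lt hi.1 (by omega)]
        omega
      rw [this]
      simp
    · rw [not_le] at hn
      rw [PySem.List.pyRange_one_append 0 j n hj.1 (by omega), List.filter_append]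
      have hpre : (PySem.List.pyRange 0 j 1).filter (fun i => PySem.Int.mod i v == j) = [] := by
        rw [List.filter_eq_nil_iff]
        intro i hi
        rw [PySem.List.mem_pyRange_one] at hi
        simp only [beq_iff_eq]
        rw [PySem.Int.mod_eq_emod_of_pos hv, Int.emod_eq_of_lt hi.1 (by omega)]
        omega
      rw [hpre, List.nil_append]

-- ===== VERDICT (by name: the statement is the Claim_ definition above) =====
theorem vertical_positions_py_spec : Claim_equal_vertical_positions_py := by
  intro board n v _ _
  unfold Spec_vertical_positions_py
  exact main_eq board n v
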